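-- pv_equiv track=rewrite | github.com/aflah02/Custom_Assembler_and_Simulator | Simple-Assembler/helper_functions.py | Duplication
-- ===== SOURCE A (Python) =====
-- def Duplication(lbl_declared,var_declared): #add in main
--     count = 0
--     count2 = 0
--     count3 = 0
--     a = len(lbl_declared)
--     for i in var_declared:
--         if i in lbl_declared:
--             count+=1
--     for i in range(0,a):
--         a2 = lbl_declared[i][0]
--         for j in range(i+1,a):
--             if a2==lbl_declared[j][0]:
--                 count2+=1
--     if count>0:
--         return -1
--     if count2>0:
--         return -2
--     return 0
-- ===== SOURCE B (Python) =====
-- def Duplication(lbl_declared, var_declared):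
--     if any(v in lbl_declared for v in var_declared):
--         return -1
--     counts = {}
--     for l in lbl_declared:
--         counts[l[0]] = counts.get(l[0], 0) + 1
--     if any(c > 1 for c in counts.values()):
--         return -2
--     return 0
-- ===== Notes on version B (the rewrite author's own statement) =====
-- stated objective: faster
-- what changed: Replaces the O(a^2) nested index scan over label pairs by a one-pass frequency table of first characters checked afterwards, and the counting overlap loop by a short-circuiting any(); the pair counters disappear entirely.
import Mathlib
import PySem

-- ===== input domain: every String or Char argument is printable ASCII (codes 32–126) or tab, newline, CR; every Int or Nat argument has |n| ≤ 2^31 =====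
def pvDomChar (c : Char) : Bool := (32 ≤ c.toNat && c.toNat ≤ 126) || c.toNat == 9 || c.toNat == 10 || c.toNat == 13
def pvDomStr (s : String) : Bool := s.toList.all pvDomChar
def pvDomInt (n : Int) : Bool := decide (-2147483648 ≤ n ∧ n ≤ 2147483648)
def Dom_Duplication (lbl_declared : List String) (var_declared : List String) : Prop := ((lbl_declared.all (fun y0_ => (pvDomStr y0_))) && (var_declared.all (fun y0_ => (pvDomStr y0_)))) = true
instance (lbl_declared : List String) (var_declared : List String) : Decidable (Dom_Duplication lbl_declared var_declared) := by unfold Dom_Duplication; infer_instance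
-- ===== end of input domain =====

-- B replaces the quadratic pairwise first-character scan by a one-pass frequency table
-- checked afterwards (objective: faster).

-- s[0] of a nonempty string (Pre_ guarantees labels are nonempty; default is irrelevant on Pre_)
def pvFirstChar (s : String) : Char := s.toList.headD ' '

-- ===== PORT A =====
def Duplication (lbl_declared : List String) (var_declared : List String) : Int :=
  let count : Int := var_declared.foldl (fun c i => if lbl_declared.contains i then c + 1 else c) 0
  let a : Int := lbl_declared.length
  let count2 : Int :=
    (PySem.List.pyRange 0 a 1).foldl (fun c2 i =>
      let a2 := pvFirstChar (lbl_declared.getD i.toNat "")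
      (PySem.List.pyRange (i + 1) a 1).foldl (fun c2' j =>
        if a2 = pvFirstChar (lbl_declared.getD j.toNat "") then c2' + 1 else c2') c2) 0
  if count > 0 then -1
  else if count2 > 0 then -2
  else 0

-- ===== PORT B =====
def Duplication_alt (lbl_declared : List String) (var_declared : List String) : Int :=
  if var_declared.any (fun v => lbl_declared.contains v) then -1
  else
    let counts : PySem.Dict Char Int :=
      lbl_declared.foldl (fun d l => d.insert (pvFirstChar l) (d.getD (pvFirstChar l) 0 + 1)) PySem.Dict.empty
    if counts.values.any (fun c => c > 1) then -2 else 0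

-- ===== PRECONDITION & SPEC =====
-- Pre_ excludes inputs containing an empty label string, on which A raises IndexError at lbl_declared[i][0].
def Pre_Duplication (lbl_declared : List String) (var_declared : List String) : Prop :=
  ∀ s ∈ lbl_declared, s ≠ ""
instance (lbl_declared : List String) (var_declared : List String) : Decidable (Pre_Duplication lbl_declared var_declared) := by unfold Pre_Duplication; infer_instance

def pvWitness_Duplication : List String × List String := (["L1", "M2"], ["x", "L1"])

def Spec_Duplication (lbl_declared : List String) (var_declared : List String) (out : Int) : Prop := out = Duplication_alt lbl_declared var_declared
instance (lbl_declared : List String) (var_declared : List String) (out : Int) : Decidable (Spec_Duplication lbl_declared var_declared out) := by unfold Spec_Duplication; infer_instance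

-- ===== CLAIM (what is proved, stated in full; the proofs are below) =====
def Claim_equal_Duplication : Prop := ∀ (lbl_declared : List String) (var_declared : List String), Dom_Duplication lbl_declared var_declared → Pre_Duplication lbl_declared var_declared → Spec_Duplication lbl_declared var_declared (Duplication lbl_declared var_declared)

-- ===== LEMMAS AND PROOFS =====

-- a sum of nonnegative integers is positive iff some summand is
theorem pv_sum_pos (l : List Int) (h : ∀ x ∈ l, 0 ≤ x) :
    (0 < l.sum) ↔ ∃ x ∈ l, 0 < x := by
  induction l with
  | nil => simp
  | cons x xs ih =>
    have hx := h x (by simp)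
    have hxs : ∀ y ∈ xs, 0 ≤ y := fun y hy => h y (by simp [hy])
    have hsum : 0 ≤ xs.sum := List.sum_nonneg hxs
    simp only [List.sum_cons, List.mem_cons]
    constructor
    · intro hpos
      by_cases hx0 : 0 < x
      · exact ⟨x, Or.inl rfl, hx0⟩
      · have : 0 < xs.sum := by omega
        obtain ⟨y, hy, hy0⟩ := (ih hxs).1 this
        exact ⟨y, Or.inr hy, hy0⟩
    · rintro ⟨y, (rfl | hy), hy0⟩
      · omega
      · have : 0 < xs.sum := (ih hxs).2 ⟨y, hy, hy0⟩
        omega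

-- firsts of the labels
def pvFirsts (lbl : List String) : List Char := lbl.map pvFirstChar

-- a duplicate pair of indices exists iff the list of first characters has a duplicate
theorem pv_pairs_iff (lbl : List String) :
    (∃ i : Int, (0 ≤ i ∧ i < (lbl.length : Int)) ∧ ∃ j : Int, (i + 1 ≤ j ∧ j < (lbl.length : Int)) ∧
        pvFirstChar (lbl.getD i.toNat "") = pvFirstChar (lbl.getD j.toNat ""))
    ↔ ¬ (pvFirsts lbl).Nodup := by
  rw [List.Nodup, List.pairwise_iff_getElem]
  push_neg
  constructor
  · rintro ⟨i, ⟨hi0, hin⟩, j, ⟨hij, hjn⟩, heq⟩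
    have hi' : i.toNat < lbl.length := by omega
    have hj' : j.toNat < lbl.length := by omega
    refine ⟨i.toNat, j.toNat, by simpa [pvFirsts], by simpa [pvFirsts], by omega, ?_⟩
    simp only [pvFirsts, List.getElem_map]
    rw [List.getD_eq_getElem lbl _ hi', List.getD_eq_getElem lbl _ hj'] at heq
    simpa using heq
  · rintro ⟨i, j, hi, hj, hij, heq⟩
    have hi' : i < lbl.length := by simpa [pvFirsts] using hi
    have hj' : j < lbl.length := by simpa [pvFirsts] using hj
    refine ⟨(i : Int), ⟨by omega, by exact_mod_cast Nat.cast_lt.2 hi'⟩, (j : Int), ⟨by omega, by exact_mod_cast Nat.cast_lt.2 hj'⟩, ?_⟩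
    simp only [Int.toNat_natCast]
    rw [List.getD_eq_getElem lbl _ hi', List.getD_eq_getElem lbl _ hj']
    simpa [pvFirsts, List.getElem_map] using heq

theorem pv_foldl_congr {α β : Type} (l : List α) (f g : β → α → β) (init : β)
    (h : ∀ acc x, f acc x = g acc x) : l.foldl f init = l.foldl g init := by
  have hfg : f = g := funext fun a => funext (h a)
  rw [hfg]

-- A's nested pair-counting loop is positive iff the first characters are not all distinct
theorem pv_count2_pos (lbl : List String) :
    (0 < (PySem.List.pyRange 0 (lbl.length : Int) 1).foldl (fun c2 i =>
      (PySem.List.pyRange (i + 1) (lbl.length : Int) 1).foldl (fun c2' j =>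
        if pvFirstChar (lbl.getD i.toNat "") = pvFirstChar (lbl.getD j.toNat "") then c2' + 1 else c2') c2) (0 : Int))
    ↔ ¬ (pvFirsts lbl).Nodup := by
  set n : Int := (lbl.length : Int) with hn
  set g : Int → Int := fun i =>
    ((PySem.List.pyRange (i + 1) n 1).countP
      (fun j => decide (pvFirstChar (lbl.getD i.toNat "") = pvFirstChar (lbl.getD j.toNat ""))) : Int) with hg
  have hcong : (PySem.List.pyRange 0 n 1).foldl (fun c2 i =>
      (PySem.List.pyRange (i + 1) n 1).foldl (fun c2' j =>
        if pvFirstChar (lbl.getD i.toNat "") = pvFirstChar (lbl.getD j.toNat "") then c2' + 1 else c2') c2) (0 : Int)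
      = (PySem.List.pyRange 0 n 1).foldl (fun c2 i => c2 + g i) 0 := by
    apply pv_foldl_congr
    intro c2 i
    rw [PySem.List.foldl_ite_add_one]
  rw [hcong, PySem.List.foldl_add]
  have hnonneg : ∀ x ∈ ((PySem.List.pyRange 0 n 1).map g), 0 ≤ x := by
    rintro x hx
    simp only [List.mem_map] at hx
    obtain ⟨i, _, rfl⟩ := hx
    simp [hg]
  rw [zero_add, pv_sum_pos _ hnonneg, ← pv_pairs_iff lbl]
  constructor
  · rintro ⟨x, hx, hx0⟩
    simp only [List.mem_map] at hx
    obtain ⟨i, hi, rfl⟩ := hx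
    rw [PySem.List.mem_pyRange_one] at hi
    have : 0 < (PySem.List.pyRange (i + 1) n 1).countP
        (fun j => decide (pvFirstChar (lbl.getD i.toNat "") = pvFirstChar (lbl.getD j.toNat ""))) := by
      simp only [hg] at hx0; exact_mod_cast hx0
    rw [List.countP_pos_iff] at this
    obtain ⟨j, hj, hP⟩ := this
    rw [PySem.List.mem_pyRange_one] at hj
    exact ⟨i, hi, j, hj, by simpa using hP⟩
  · rintro ⟨i, hi, j, hj, heq⟩
    refine ⟨g i, List.mem_map_of_mem (by rw [PySem.List.mem_pyRange_one]; exact hi), ?_⟩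
    have : 0 < (PySem.List.pyRange (i + 1) n 1).countP
        (fun j => decide (pvFirstChar (lbl.getD i.toNat "") = pvFirstChar (lbl.getD j.toNat ""))) := by
      rw [List.countP_pos_iff]
      exact ⟨j, by rw [PySem.List.mem_pyRange_one]; exact hj, by simpa using heq⟩
    simp only [hg]
    exact_mod_cast this

-- A's membership-counting loop is positive iff B's any() fires
theorem pv_count_pos (lbl var : List String) :
    (0 < var.foldl (fun c i => if lbl.contains i then c + 1 else c) (0 : Int))
    ↔ var.any (fun v => lbl.contains v) = true := by
  rw [PySem.List.foldl_if_add_one, zero_add]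
  rw [List.any_eq_true]
  constructor
  · intro h
    have : 0 < var.countP (fun v => lbl.contains v) := by exact_mod_cast h
    rw [List.countP_pos_iff] at this
    obtain ⟨v, hv, hP⟩ := this
    exact ⟨v, hv, hP⟩
  · rintro ⟨v, hv, hP⟩
    have : 0 < var.countP (fun v => lbl.contains v) := List.countP_pos_iff.2 ⟨v, hv, hP⟩
    exact_mod_cast this

-- B's frequency-table check fires iff the first characters are not all distinct
theorem pv_counter_pos (lbl : List String) :
    ((lbl.foldl (fun d l => d.insert (pvFirstChar l) (d.getD (pvFirstChar l) 0 + 1))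
        (PySem.Dict.empty : PySem.Dict Char Int)).values.any (fun c => c > 1) = true)
    ↔ ¬ (pvFirsts lbl).Nodup := by
  have hfold : lbl.foldl (fun d l => d.insert (pvFirstChar l) (d.getD (pvFirstChar l) 0 + 1))
      (PySem.Dict.empty : PySem.Dict Char Int)
      = PySem.Dict.counter (pvFirsts lbl) := by
    have h1 : lbl.foldl (fun d l => d.insert (pvFirstChar l) (d.getD (pvFirstChar l) 0 + 1))
        (PySem.Dict.empty : PySem.Dict Char Int)
        = (lbl.map pvFirstChar).foldl (fun d c => d.insert c (d.getD c 0 + 1))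
            (PySem.Dict.empty : PySem.Dict Char Int) :=
      by rw [List.foldl_map]
    rw [pvFirsts, h1, PySem.Dict.foldl_insert_getD_add_one_eq_counter]
  rw [hfold]
  rw [List.nodup_iff_count_le_one]
  push_neg
  simp only [PySem.Dict.values, PySem.Dict.items_counter, List.map_map, List.any_eq_true,
    List.mem_map, Function.comp]
  constructor
  · rintro ⟨c, ⟨k, hk, rfl⟩, hgt⟩
    exact ⟨k, by simpa using hgt⟩
  · rintro ⟨k, hk⟩
    have hmem : k ∈ pvFirsts lbl := by
      rw [← List.count_pos_iff]; omega
    exact ⟨(pvFirsts lbl).count k, ⟨k, by rw [PySem.Set.mem_ofList]; exact hmem, rfl⟩, by simpa using hk⟩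

theorem Duplication_eq (lbl var : List String) :
    Duplication lbl var = Duplication_alt lbl var := by
  unfold Duplication Duplication_alt
  simp only
  by_cases h1 : var.any (fun v => lbl.contains v) = true
  · rw [if_pos ((pv_count_pos lbl var).2 h1), if_pos h1]
  · rw [if_neg (fun h => h1 ((pv_count_pos lbl var).1 h)), if_neg h1]
    by_cases h2 : (pvFirsts lbl).Nodup
    · rw [if_neg (fun h => ((pv_count2_pos lbl).1 h) h2),
        if_neg (fun h => ((pv_counter_pos lbl).1 h) h2)]
    · rw [if_pos ((pv_count2_pos lbl).2 h2), if_pos ((pv_counter_pos lbl).2 h2)]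

-- ===== VERDICT (by name: the statement is the Claim_ definition above) =====
theorem Duplication_spec : Claim_equal_Duplication := by
  intro lbl var _ _
  exact Duplication_eq lbl var
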